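-- pv_equiv track=rewrite | github.com/dv347/structured-gen | src/grammar_generator.py | merge_quoted_strings
-- ===== SOURCE A (Python) =====
-- from typing import Dict, List, Set
--
-- def merge_quoted_strings(lst: List[str]) -> List[str]:
--     merged_list = []
--     temp = ""
--
--     for item in lst:
--         if item.startswith('"') and item.endswith('"'):
--             temp += item[1:-1]
--         else:
--             if temp:
--                 merged_list.append(f'"{temp}"')
--                 temp = ""
--             merged_list.append(item)
--
--     if temp:
--         merged_list.append(f'"{temp}"')
--
--     return merged_list
-- ===== SOURCE B (Python) =====
-- from typing import Dict, List, Set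
--
--
-- def merge_quoted_strings(lst: List[str]) -> List[str]:
--     # Backward pass: walk the list right-to-left, keeping the already-built
--     # result as a stack (stored reversed, so its last element is the logical
--     # front). A quoted token is merged into the quoted front of the result if
--     # there is one; empty merged content is dropped.
--     out = []  # reversed result; out[-1] is the logical front
--     for item in reversed(lst):
--         if item.startswith('"') and item.endswith('"'):
--             if out and out[-1].startswith('"') and out[-1].endswith('"'):
--                 content = item[1:-1] + out.pop()[1:-1]
--             else:
--                 content = item[1:-1]
--             if content:
--                 out.append(f'"{content}"')
--         else:
--             out.append(item)
--     return out[::-1]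
-- ===== Notes on version B (the rewrite author's own statement) =====
-- stated objective: alternative
-- what changed: Replaces A's forward scan with a running string accumulator and end-of-run flush by a backward (right-to-left) pass that merges each quoted token directly into the quoted front of the already-built result stack.
import Mathlib
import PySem

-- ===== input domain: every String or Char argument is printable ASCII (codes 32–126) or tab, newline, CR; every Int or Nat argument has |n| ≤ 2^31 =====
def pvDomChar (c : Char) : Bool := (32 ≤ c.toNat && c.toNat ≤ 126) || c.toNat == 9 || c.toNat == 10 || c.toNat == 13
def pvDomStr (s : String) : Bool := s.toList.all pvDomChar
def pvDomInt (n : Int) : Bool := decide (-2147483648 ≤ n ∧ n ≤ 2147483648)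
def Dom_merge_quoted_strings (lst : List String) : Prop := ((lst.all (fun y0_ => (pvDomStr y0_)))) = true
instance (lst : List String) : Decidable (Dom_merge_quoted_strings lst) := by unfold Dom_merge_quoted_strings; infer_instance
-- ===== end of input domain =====

-- B replaces A's forward scan with a running accumulator/flush by a backward pass
-- that merges each quoted token into the quoted front of the already-built result;
-- objective: alternative (same cost, different traversal direction and state).


-- item.startswith('"') and item.endswith('"')
def pvIsQuoted (s : String) : Bool :=
  PySem.Str.startswith s "\"" && PySem.Str.endswith s "\""

-- item[1:-1]
def pvStripQuotes (s : String) : String :=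
  PySem.Str.slice s (some 1) (some (-1))

-- ===== PORT A =====
-- A's for-loop with state (merged_list, temp), then the final flush of temp
def pvMergeLoop : List String → List String → String → List String
  | [], merged_list, temp =>
      if temp ≠ "" then merged_list ++ ["\"" ++ temp ++ "\""] else merged_list
  | item :: rest, merged_list, temp =>
      if pvIsQuoted item then
        pvMergeLoop rest merged_list (temp ++ pvStripQuotes item)
      else
        pvMergeLoop rest
          ((if temp ≠ "" then merged_list ++ ["\"" ++ temp ++ "\""] else merged_list) ++ [item])
          ""

def merge_quoted_strings (lst : List String) : List String :=
  pvMergeLoop lst [] ""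

-- ===== PORT B =====
-- one iteration of Source B's backward loop; 'out' is the stack (its head is the
-- logical front of the result built so far)
def pvStepB (out : List String) (item : String) : List String :=
  if pvIsQuoted item then
    let p : String × List String :=
      match out with
      | top :: rest =>
          if pvIsQuoted top then (pvStripQuotes item ++ pvStripQuotes top, rest)
          else (pvStripQuotes item, top :: rest)
      | [] => (pvStripQuotes item, [])
    if p.1 ≠ "" then ("\"" ++ p.1 ++ "\"") :: p.2 else p.2
  else item :: out

-- for item in reversed(lst): …  ; return out[::-1] (the stack is kept reversed)
def merge_quoted_strings_alt (lst : List String) : List String :=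
  lst.reverse.foldl pvStepB []

-- ===== PRECONDITION & SPEC =====
def Spec_merge_quoted_strings (lst : List String) (out : List String) : Prop := out = merge_quoted_strings_alt lst
instance (lst : List String) (out : List String) : Decidable (Spec_merge_quoted_strings lst out) := by unfold Spec_merge_quoted_strings; infer_instance

-- ===== CLAIM (what is proved, stated in full; the proofs are below) =====
def Claim_equal_merge_quoted_strings : Prop := ∀ (lst : List String), Dom_merge_quoted_strings lst → Spec_merge_quoted_strings lst (merge_quoted_strings lst)

-- ===== LEMMAS AND PROOFS =====

theorem quote_isQuoted (s : String) : pvIsQuoted ("\"" ++ s ++ "\"") = true := by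
  simp [pvIsQuoted, PySem.Chars.startswith_iff, PySem.Chars.endswith_iff,
    List.prefix_iff_eq_take, List.suffix_iff_eq_drop]

theorem strip_quote (s : String) : pvStripQuotes ("\"" ++ s ++ "\"") = s := by
  rw [← String.toList_inj]
  simp [pvStripQuotes, PySem.List.slice]

theorem append_ne_empty_right (a b : String) (h : b ≠ "") : a ++ b ≠ "" := by
  intro hc
  rw [← String.toList_inj] at hc
  simp at hc
  exact h hc.2

-- invariant on B's stack: a quoted element is an emitted '"c"' with c nonempty,
-- and is never immediately followed by another quoted element
def pvHeadQuoted : List String → Bool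
  | [] => false
  | y :: _ => pvIsQuoted y

def pvGood : List String → Bool
  | [] => true
  | x :: rest =>
      (!pvIsQuoted x ||
        (x == "\"" ++ pvStripQuotes x ++ "\"" && pvStripQuotes x != "" && !pvHeadQuoted rest))
      && pvGood rest

theorem good_step (r : List String) (x : String) (h : pvGood r = true) :
    pvGood (pvStepB r x) = true := by
  by_cases hx : pvIsQuoted x = true
  · cases r with
    | nil =>
        by_cases hs : pvStripQuotes x = ""
        · simp [pvStepB, hx, hs, pvGood]
        · simp [pvStepB, hx, hs, pvGood, pvHeadQuoted, quote_isQuoted, strip_quote]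
    | cons top rest =>
        by_cases ht : pvIsQuoted top = true
        · simp [pvGood, ht] at h
          have hne : pvStripQuotes x ++ pvStripQuotes top ≠ "" :=
            append_ne_empty_right _ _ h.1.1.2
          simp [pvStepB, hx, ht, hne, pvGood, quote_isQuoted, strip_quote, h.2, h.1.2]
        · simp [pvGood, ht] at h
          by_cases hs : pvStripQuotes x = ""
          · simp [pvStepB, hx, ht, hs, pvGood, h]
          · simp [pvStepB, hx, ht, hs, pvGood, pvHeadQuoted, quote_isQuoted, strip_quote, h]
  · simp [pvStepB, hx, pvGood, h]

theorem alt_cons (x : String) (xs : List String) :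
    merge_quoted_strings_alt (x :: xs) = pvStepB (merge_quoted_strings_alt xs) x := by
  simp [merge_quoted_strings_alt, List.foldl_append]

theorem good_alt (lst : List String) : pvGood (merge_quoted_strings_alt lst) = true := by
  induction lst with
  | nil => simp [merge_quoted_strings_alt, pvGood]
  | cons x xs ih => rw [alt_cons]; exact good_step _ _ ih

theorem quoted_dq : pvIsQuoted "\"\"" = true := by decide

theorem strip_dq : pvStripQuotes "\"\"" = "" := by decide

theorem stepB_empty (r : List String) (h : pvGood r = true) : pvStepB r "\"\"" = r := by
  cases r with
  | nil => decide
  | cons top rest =>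
      by_cases ht : pvIsQuoted top = true
      · simp [pvGood, ht] at h
        simp [pvStepB, quoted_dq, strip_dq, ht, h.1.1.2]
        exact h.1.1.1.symm
      · simp [pvStepB, quoted_dq, strip_dq, ht]

theorem append_assoc' (a b c : String) : a ++ (b ++ c) = (a ++ b) ++ c := by
  rw [← String.toList_inj]; simp

theorem stepB_merge (r : List String) (x temp : String) (hx : pvIsQuoted x = true)
    (h : pvGood r = true) :
    pvStepB (pvStepB r x) ("\"" ++ temp ++ "\"") =
      pvStepB r ("\"" ++ (temp ++ pvStripQuotes x) ++ "\"") := by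
  cases r with
  | nil =>
      by_cases hs : pvStripQuotes x = ""
      · simp [pvStepB, hx, hs, quote_isQuoted, strip_quote, String.append_empty]
      · have hne : temp ++ pvStripQuotes x ≠ "" := append_ne_empty_right _ _ hs
        simp [pvStepB, hx, hs, quote_isQuoted, strip_quote, hne]
  | cons top rest =>
      by_cases ht : pvIsQuoted top = true
      · simp [pvGood, ht] at h
        have h1 : pvStripQuotes x ++ pvStripQuotes top ≠ "" :=
          append_ne_empty_right _ _ h.1.1.2
        have h2 : temp ++ (pvStripQuotes x ++ pvStripQuotes top) ≠ "" :=
          append_ne_empty_right _ _ h1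
        have h3 : (temp ++ pvStripQuotes x) ++ pvStripQuotes top ≠ "" := by
          rw [← append_assoc']; exact h2
        simp [pvStepB, hx, ht, quote_isQuoted, strip_quote, h1, h2, h3]
        exact append_assoc' _ _ _
      · by_cases hs : pvStripQuotes x = ""
        · simp [pvStepB, hx, ht, hs, quote_isQuoted, strip_quote, String.append_empty]
        · have hne : temp ++ pvStripQuotes x ≠ "" := append_ne_empty_right _ _ hs
          simp [pvStepB, hx, ht, hs, quote_isQuoted, strip_quote, hne]

-- the accumulator factors out of A's loop
theorem pvMergeLoop_acc (lst : List String) :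
    ∀ acc temp, pvMergeLoop lst acc temp = acc ++ pvMergeLoop lst [] temp := by
  induction lst with
  | nil => intro acc temp; by_cases h : temp = "" <;> simp [pvMergeLoop, h]
  | cons x xs ih =>
      intro acc temp
      by_cases hq : pvIsQuoted x
      · simp only [pvMergeLoop, hq, if_pos]
        exact ih acc _
      · simp only [pvMergeLoop, hq, Bool.false_eq_true, if_false]
        rw [ih, ih (_ ++ [x])]
        split_ifs <;> simp [List.append_assoc]

-- A's loop with pending temp = B's result with the quoted token '"temp"' pushed in front
theorem key (lst : List String) :
    ∀ temp, pvMergeLoop lst [] temp =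
      pvStepB (merge_quoted_strings_alt lst) ("\"" ++ temp ++ "\"") := by
  induction lst with
  | nil =>
      intro temp
      by_cases hT : temp = "" <;>
        simp [pvMergeLoop, merge_quoted_strings_alt, pvStepB, quote_isQuoted, strip_quote,
          quoted_dq, strip_dq, hT]
  | cons x xs ih =>
      intro temp
      rw [alt_cons]
      by_cases hq : pvIsQuoted x = true
      · simp only [pvMergeLoop, hq, if_pos]
        rw [ih, stepB_merge _ _ _ hq (good_alt xs)]
      · simp only [pvMergeLoop, hq, Bool.false_eq_true, if_false]
        rw [pvMergeLoop_acc, ih ""]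
        have hdq : ("\"" ++ "" ++ "\"" : String) = "\"\"" := by decide
        rw [hdq, stepB_empty _ (good_alt xs)]
        by_cases hT : temp = "" <;>
          simp [pvStepB, hq, hT, quote_isQuoted, strip_quote, quoted_dq, strip_dq]

-- ===== VERDICT (by name: the statement is the Claim_ definition above) =====
theorem merge_quoted_strings_spec : Claim_equal_merge_quoted_strings := by
  intro lst _
  show merge_quoted_strings lst = merge_quoted_strings_alt lst
  have h := key lst ""
  rw [merge_quoted_strings, h]
  have : ("\"" ++ "" ++ "\"" : String) = "\"\"" := by decide
  rw [this, stepB_empty _ (good_alt lst)]
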